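-- pv_equiv track=rewrite | github.com/Asal92/Natural-Language-Processing | HW5-HMM-POS-Tagger/hmm_model_build.py | bi_tag_count
-- ===== SOURCE A (Python) =====
-- START_STR = "<s>"
--
-- END_STR = "</s>"
--
-- def bi_tag_count(sents):
--     bi_count_dict = {}
--     for s in sents:
--         l = len(s)
--         # if index == 0: add start tag, and if index == len(s)-1: add end tag
--         for i in range(0,l):
--             bi_tag = []
--             tag = s[i][1]
--
--             if i == 0:
--                 # add start + add with next element
--                 if l > 1: # what if len is 1?
--                     bi_tag.append((START_STR,tag))
--                     tag1 = s[i + 1][1]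
--                     bi_tag.append((tag,tag1))
--                 else:
--                     bi_tag.append((START_STR, tag))
--                     bi_tag.append((tag, END_STR))
--             elif i == l-1:
--                 # add end
--                 bi_tag.append((tag,END_STR))
--             else:
--                 # do normal i:i+1
--                 tag1 = s[i + 1][1]
--                 bi_tag.append((tag,tag1))
--
--             for b in bi_tag:
--                 if b in bi_count_dict:
--                     bi_count_dict[b] += 1
--                 else:
--                     bi_count_dict[b] = 1
--     return bi_count_dict
-- ===== SOURCE B (Python) =====
-- START_STR = "<s>"
--
-- END_STR = "</s>"
--
-- def bi_tag_count(sents):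
--     counts = {}
--     for s in sents:
--         if not s:
--             continue
--         tags = [START_STR] + [tok[1] for tok in s] + [END_STR]
--         for b in zip(tags, tags[1:]):
--             counts[b] = counts.get(b, 0) + 1
--     return counts
-- ===== Notes on version B (the rewrite author's own statement) =====
-- stated objective: simpler
-- what changed: Replaces the index loop with its i==0/i==l-1/middle special cases by padding each sentence's tags with <s> and </s> and counting consecutive pairs from zip(tags, tags[1:]) in one uniform pass.
import Mathlib
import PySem

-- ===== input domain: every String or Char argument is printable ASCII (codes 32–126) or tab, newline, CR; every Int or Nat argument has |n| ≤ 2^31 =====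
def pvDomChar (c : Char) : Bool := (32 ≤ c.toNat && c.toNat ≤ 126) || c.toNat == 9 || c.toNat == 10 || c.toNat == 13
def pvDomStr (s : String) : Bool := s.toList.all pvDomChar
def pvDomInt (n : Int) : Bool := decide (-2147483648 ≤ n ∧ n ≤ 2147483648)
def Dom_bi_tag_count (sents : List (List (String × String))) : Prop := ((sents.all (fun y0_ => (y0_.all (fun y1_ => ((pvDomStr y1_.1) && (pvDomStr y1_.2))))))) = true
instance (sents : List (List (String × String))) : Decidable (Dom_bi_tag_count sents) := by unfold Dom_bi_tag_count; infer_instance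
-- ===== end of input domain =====

-- B replaces A's i==0 / i==l-1 special-cased index loop by padding each sentence's tags with <s>/</s>
-- and counting consecutive zip pairs in one uniform pass (objective: simpler; same return value).


def START_STR : String := "<s>"
def END_STR : String := "</s>"

-- ===== PORT A =====
-- the bigram list bi_tag that A builds for index i (indices are always in range in the Python; getD's default is never read)
def biTagA (s : List (String × String)) (i : Nat) : List (String × String) :=
  let l := s.length
  let tag := (s.getD i ("", "")).2
  if i = 0 then
    if l > 1 then [(START_STR, tag), (tag, (s.getD (i+1) ("", "")).2)]
    else [(START_STR, tag), (tag, END_STR)]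
  else if i = l - 1 then [(tag, END_STR)]
  else [(tag, (s.getD (i+1) ("", "")).2)]

def bi_tag_count (sents : List (List (String × String))) : List (String × String × Int) :=
  (sents.foldl (fun d s =>
      (List.range s.length).foldl (fun d i =>
        (biTagA s i).foldl (fun d b =>
          if d.contains b then d.insert b (d.getD b 0 + 1) else d.insert b 1) d) d)
    (PySem.Dict.empty : PySem.Dict (String × String) Int)).items.map
    (fun p => (p.1.1, p.1.2, p.2))

-- ===== PORT B =====
def bi_tag_count_alt (sents : List (List (String × String))) : List (String × String × Int) :=
  (sents.foldl (fun d s =>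
      if s.isEmpty then d
      else
        let tags := [START_STR] ++ s.map (·.2) ++ [END_STR]
        -- tags[1:] ported via PySem.List.slice
        (tags.zip (PySem.List.slice tags (some 1) none)).foldl
          (fun d b => d.insert b (d.getD b 0 + 1)) d)
    (PySem.Dict.empty : PySem.Dict (String × String) Int)).items.map
    (fun p => (p.1.1, p.1.2, p.2))

-- ===== PRECONDITION & SPEC =====
def Spec_bi_tag_count (sents : List (List (String × String))) (out : List (String × String × Int)) : Prop := out = bi_tag_count_alt sents
instance (sents : List (List (String × String))) (out : List (String × String × Int)) : Decidable (Spec_bi_tag_count sents out) := by unfold Spec_bi_tag_count; infer_instance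

-- ===== CLAIM (what is proved, stated in full; the proofs are below) =====
def Claim_equal_bi_tag_count : Prop := ∀ (sents : List (List (String × String))), Dom_bi_tag_count sents → Spec_bi_tag_count sents (bi_tag_count sents)

-- ===== LEMMAS AND PROOFS =====

-- the pair sequence "adjacent tags then a final (last, END)" that both programs count, per sentence
def pairsE : List String → List (String × String)
  | [] => []
  | [a] => [(a, END_STR)]
  | a :: b :: r => (a, b) :: pairsE (b :: r)

-- B-side: zipping the END-padded tag list against its tail yields pairsE
lemma zip_shift (ts : List String) (h : ts ≠ []) :
    (ts ++ [END_STR]).zip (ts.tail ++ [END_STR]) = pairsE ts := by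
  induction ts with
  | nil => exact absurd rfl h
  | cons a rest ih =>
    cases rest with
    | nil => simp [pairsE]
    | cons b r =>
      simp only [List.tail_cons, List.cons_append, List.zip_cons_cons, pairsE]
      have := ih (by simp)
      simpa using this

-- A-side: the i ≥ 1 part of A's loop, re-indexed, flattens to pairsE of the remaining tags
lemma flat_shift (ts : List String) (h : ts ≠ []) :
    (List.range ts.length).flatMap (fun j =>
      if j + 1 = ts.length then [(ts.getD j "", END_STR)]
      else [(ts.getD j "", ts.getD (j+1) "")]) = pairsE ts := by
  induction ts with
  | nil => exact absurd rfl h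
  | cons a rest ih =>
    cases rest with
    | nil => simp [pairsE]
    | cons b r =>
      rw [List.length_cons, List.range_succ_eq_map, List.flatMap_cons, List.flatMap_map]
      have tail_eq : (List.range (b :: r).length).flatMap
          (fun j => if j + 1 + 1 = (b :: r).length + 1
            then [((a :: b :: r).getD (j+1) "", END_STR)]
            else [((a :: b :: r).getD (j+1) "", (a :: b :: r).getD (j+1+1) "")])
          = pairsE (b :: r) := by
        rw [← ih (by simp)]
        apply List.flatMap_congr
        intro j hj
        simp
      simp only [List.getD_cons_succ] at tail_eq ⊢
      rw [tail_eq]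
      simp [pairsE]

-- snd-of-getD commutes with mapping snd
lemma getD_snd (s : List (String × String)) (i : Nat) :
    (s.getD i ("", "")).2 = (s.map (·.2)).getD i "" := by
  simp only [List.getD_eq_getElem?_getD, List.getElem?_map]
  cases s[i]? <;> rfl

-- A's whole per-sentence bigram sequence, for a nonempty sentence
lemma flatA (s : List (String × String)) (h : s ≠ []) :
    (List.range s.length).flatMap (biTagA s)
      = (START_STR, (s.map (·.2)).getD 0 "") :: pairsE (s.map (·.2)) := by
  cases s with
  | nil => exact absurd rfl h
  | cons x rest =>
    rw [List.length_cons, List.range_succ_eq_map, List.flatMap_cons, List.flatMap_map]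
    have tail_eq : (List.range rest.length).flatMap (fun j => biTagA (x :: rest) (j+1))
        = pairsE (rest.map (·.2)) := by
      cases rest with
      | nil => simp [pairsE]
      | cons y r =>
        rw [← flat_shift ((y :: r).map (·.2)) (by simp)]
        simp only [List.length_map]
        apply List.flatMap_congr
        intro j hj
        simp only [List.mem_range] at hj
        simp only [biTagA, getD_snd, List.length_cons, List.map_cons, Nat.add_sub_cancel,
          Nat.succ_ne_zero, if_false, List.getD_cons_succ]
    rw [tail_eq]
    cases rest with
    | nil => simp [biTagA, pairsE]
    | cons y r =>
      simp [biTagA, pairsE]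

-- A's membership-tested counting update is B's get-with-default update
lemma step_eq (d : PySem.Dict (String × String) Int) (b : String × String) :
    (if d.contains b then d.insert b (d.getD b 0 + 1) else d.insert b 1)
      = d.insert b (d.getD b 0 + 1) := by
  by_cases hc : d.contains b
  · simp [hc]
  · rw [if_neg hc, PySem.Dict.getD_of_not_contains d 0 (by simpa using hc)]
    norm_num

-- the two per-sentence dict updates are the same function, so the outer folds agree
lemma dict_eq (sents : List (List (String × String))) :
    (sents.foldl (fun d s =>
      (List.range s.length).foldl (fun d i =>
        (biTagA s i).foldl (fun d b =>
          if d.contains b then d.insert b (d.getD b 0 + 1) else d.insert b 1) d) d)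
      (PySem.Dict.empty : PySem.Dict (String × String) Int))
    = (sents.foldl (fun d s =>
      if s.isEmpty then d
      else
        let tags := [START_STR] ++ s.map (·.2) ++ [END_STR]
        (tags.zip (PySem.List.slice tags (some 1) none)).foldl
          (fun d b => d.insert b (d.getD b 0 + 1)) d)
      (PySem.Dict.empty : PySem.Dict (String × String) Int)) := by
  have hf : ∀ (d : PySem.Dict (String × String) Int) (s : List (String × String)),
      (List.range s.length).foldl (fun d i =>
        (biTagA s i).foldl (fun d b =>
          if d.contains b then d.insert b (d.getD b 0 + 1) else d.insert b 1) d) d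
      = (if s.isEmpty then d
         else
           let tags := [START_STR] ++ s.map (·.2) ++ [END_STR]
           (tags.zip (PySem.List.slice tags (some 1) none)).foldl
             (fun d b => d.insert b (d.getD b 0 + 1)) d) := by
    intro d s
    simp only [step_eq]
    rw [← List.foldl_flatMap]
    by_cases hs : s = []
    · subst hs; simp
    · rw [flatA s hs, if_neg (by simpa [List.isEmpty_iff] using hs)]
      congr 1
      rw [PySem.List.slice_from_one]
      have hts : s.map (·.2) ≠ [] := by simpa using hs
      cases hm : s.map (·.2) with
      | nil => exact absurd hm hts
      | cons t0 w =>
        have hz : ((t0 :: w) ++ [END_STR]).zip (w ++ [END_STR]) = pairsE (t0 :: w) := by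
          simpa using zip_shift (t0 :: w) (by simp)
        simp [List.zip_cons_cons]
        exact hz.symm
  simp only [hf]

-- ===== VERDICT (by name: the statement is the Claim_ definition above) =====
theorem bi_tag_count_spec : Claim_equal_bi_tag_count := by
  intro sents _
  show bi_tag_count sents = bi_tag_count_alt sents
  unfold bi_tag_count bi_tag_count_alt
  rw [dict_eq]
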